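-- pv_equiv track=rewrite | github.com/Jfelipeper/Tp1_Alumnos_Udesa | tp1_DeElizalde/tp1_funciones_DeElizalde.py | rachas
-- ===== SOURCE A (Python) =====
-- def rachas(pronostico):     # Esta funcion calcula las rachas de dias pedidas por el ejercicio
--     '''
--     Esta funcion calcula todas las rachas que se buscan, la mas larga y las que son mayores a 3
--
--     Toma como input:
--         - La lista de climas ya pronosticados, generada por la funcion full_pronostico
--
--     Despues calcula la racha actual, que lo hace al comparar el valor actual de la lista con el anterior y fijandose si son iguales, y si es verdad sumar uno a la racha actual
--     Va comparando la raacha actual con la racha maxima y si esta es mayor le asigna el valor de la racha actual a la racha maxima, y tambien  guarda la condicion de este clima como clima_max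
--     Al mismo tiempo revisa si la racha actual es igual a 4, para ver si esta es mayor a 3 (No uso un > 3 porque podria contar la misma racha varias veces)
--     Y si los valores de la lista de pronosticos no son iguales resetea la racha actual a 1
--
--     Luego devuelve:
--         - racha_max: Un valor numerico de la racha maxima
--         - clima_max: La condicion climatica de la racha maxima
--         - rachas_3: La cantidad de rachas que superaron 3 de longitud
--
--     '''
--
--     racha_max = 1
--     racha_act = 1       # Esta columna establece valores arbitrarios para las variables que voy a usar
--     rachas_3 = 0
--     clima_max = pronostico[0]
--
--     for i in range(1, len(pronostico)):         # Este ciclo va a pasar por todos los items del diccionario de climas para calcular las rachas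
--         if pronostico[i] == pronostico[i-1]:
--             racha_act += 1                      # Este if va revisando si el item de la lista es igual al anterior y si si va sumando 1 a la reacha actual
--
--             if racha_act > racha_max:           # Al mismo tiemmpo, dentro del if, se va revisando si la racha actual es mayor que otra racha calculada, y si se logra esto s eguarda el numeor de la racha y el clima en el momento
--                 racha_max = racha_act
--                 clima_max = pronostico[i]
--
--             if racha_act == 4:                  # Tambien vamos viendo cuando la racha supera a 3, es importante notar que solo tomamos que sea igual a 4 y no mayor a 3 porque sino contaria la misma racha varias veces
--                 rachas_3 += 1
--         else:
--             racha_act = 1                       # Y este else hace que cuando dos items del diccionario consecutivos no sean iguales, resetee la racha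
--
--     return racha_max, clima_max, rachas_3       # Aca devolvemos los valores de las rachas que necesitamos saber
-- ===== SOURCE B (Python) =====
-- def rachas(pronostico):
--     # Two-phase rewrite: first run-length-encode the forecast into (clima, largo)
--     # pairs, then read the three answers off that list of runs.
--     runs = []
--     actual = pronostico[0]          # raises IndexError on empty input, like A
--     largo = 0
--     for clima in pronostico:
--         if clima == actual:
--             largo += 1
--         else:
--             runs.append((actual, largo))
--             actual, largo = clima, 1
--     runs.append((actual, largo))
--
--     racha_max = max(largo for _, largo in runs)
--     clima_max = next(clima for clima, largo in runs if largo == racha_max)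
--     rachas_3 = sum(1 for _, largo in runs if largo >= 4)
--     return racha_max, clima_max, rachas_3
-- ===== Notes on version B (the rewrite author's own statement) =====
-- stated objective: idiomatic
-- what changed: B first run-length-encodes the forecast into (clima, length) pairs and then reads racha_max (max run length), clima_max (first run of that length) and rachas_3 (runs of length >= 4) off that list, instead of A's single index loop tracking four mutable counters; Pre_ excludes the empty list, on which both programs raise IndexError.
import Mathlib
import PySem

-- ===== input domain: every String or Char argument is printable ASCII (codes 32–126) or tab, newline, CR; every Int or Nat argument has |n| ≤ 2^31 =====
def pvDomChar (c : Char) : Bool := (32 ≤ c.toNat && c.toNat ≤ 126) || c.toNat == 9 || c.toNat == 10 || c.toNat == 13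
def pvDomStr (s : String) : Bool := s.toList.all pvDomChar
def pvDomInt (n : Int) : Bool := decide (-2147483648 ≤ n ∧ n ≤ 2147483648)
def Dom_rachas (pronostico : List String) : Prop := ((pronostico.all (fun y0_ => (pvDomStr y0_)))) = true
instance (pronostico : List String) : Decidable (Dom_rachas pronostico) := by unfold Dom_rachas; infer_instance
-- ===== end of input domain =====

-- B replaces A's single index loop over four mutable counters by a run-length encoding
-- followed by three reads over the run list (idiomatic decomposition, same O(n) cost);
-- both programs raise IndexError on the empty list, which Pre_ excludes.


-- ===== PORT A =====
-- A's for-loop over range(1, len) compares each element with its predecessor; the obvious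
-- structural recursion carries the predecessor and the same four state variables.
def rachasLoop (prev : String) (rest : List String)
    (racha_max racha_act rachas_3 : Int) (clima_max : String) : Int × String × Int :=
  match rest with
  | [] => (racha_max, clima_max, rachas_3)
  | x :: xs =>
    if x = prev then
      let racha_act' := racha_act + 1
      let racha_max' := if racha_max < racha_act' then racha_act' else racha_max
      let clima_max' := if racha_max < racha_act' then x else clima_max
      let rachas_3' := if racha_act' = 4 then rachas_3 + 1 else rachas_3
      rachasLoop x xs racha_max' racha_act' rachas_3' clima_max'
    else
      rachasLoop x xs racha_max 1 rachas_3 clima_max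

def rachas (pronostico : List String) : Int × String × Int :=
  match pronostico with
  | [] => (1, "", 0)   -- Python raises IndexError at pronostico[0]; excluded by Pre_rachas
  | p0 :: rest => rachasLoop p0 rest 1 1 0 p0

-- ===== PORT B =====
-- Source B's run-length-encoding loop: state (actual, largo), emitting a (clima, largo) pair
-- at each change of value and once at the end.
def rleLoop (actual : String) (largo : Int) : List String → List (String × Int)
  | [] => [(actual, largo)]
  | clima :: xs =>
      if clima = actual then rleLoop actual (largo + 1) xs
      else (actual, largo) :: rleLoop clima 1 xs

def rachas_alt (pronostico : List String) : Int × String × Int :=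
  match pronostico with
  | [] => (1, "", 0)   -- Source B raises IndexError at pronostico[0] too; excluded by Pre_rachas
  | p0 :: rest =>
    let runs := rleLoop p0 0 (p0 :: rest)
    let racha_max := (PySem.List.max? (runs.map Prod.snd) (fun y => y)).getD 0
    let clima_max := ((runs.find? (fun p => p.2 == racha_max)).map Prod.fst).getD ""
    let rachas_3 := ((runs.filter (fun p => 4 ≤ p.2)).length : Int)
    (racha_max, clima_max, rachas_3)

-- ===== PRECONDITION & SPEC =====
-- Pre_ excludes only the empty list, on which both Pythons raise IndexError.
def Pre_rachas (pronostico : List String) : Prop := pronostico ≠ []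
instance (pronostico : List String) : Decidable (Pre_rachas pronostico) := by unfold Pre_rachas; infer_instance
def pvWitness_rachas : List String := ["sol", "sol", "lluvia"]
def Spec_rachas (pronostico : List String) (out : Int × String × Int) : Prop := out = rachas_alt pronostico
instance (pronostico : List String) (out : Int × String × Int) : Decidable (Spec_rachas pronostico out) := by unfold Spec_rachas; infer_instance

-- ===== CLAIM (what is proved, stated in full; the proofs are below) =====
def Claim_equal_rachas : Prop := ∀ (pronostico : List String), Dom_rachas pronostico → Pre_rachas pronostico → Spec_rachas pronostico (rachas pronostico)

-- ===== LEMMAS AND PROOFS =====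

/-- Maximum of the run lengths (0 on the empty list; all real runs have length ≥ 1). -/
def maxSnd : List (String × Int) → Int
  | [] => 0
  | p :: t => max p.2 (maxSnd t)

/-- Key of the first run of length `m` (default `""`). -/
def firstKey (rs : List (String × Int)) (m : Int) : String :=
  ((rs.find? (fun p => p.2 == m)).map Prod.fst).getD ""

/-- Number of runs of length ≥ 4. -/
def cnt4 (rs : List (String × Int)) : Int :=
  ((rs.filter (fun p => 4 ≤ p.2)).length : Int)

theorem cnt4_cons (p : String × Int) (t : List (String × Int)) :
    cnt4 (p :: t) = (if 4 ≤ p.2 then 1 else 0) + cnt4 t := by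
  by_cases h : 4 ≤ p.2 <;> simp [cnt4, h] <;> omega

theorem rachasLoop_cons_eq (prev x : String) (xs : List String) (M n c3 : Int) (K : String)
    (h : x = prev) :
    rachasLoop prev (x :: xs) M n c3 K =
      rachasLoop x xs (if M < n + 1 then n + 1 else M) (n + 1)
        (if n + 1 = 4 then c3 + 1 else c3) (if M < n + 1 then x else K) := by
  simp [rachasLoop, h]

theorem rachasLoop_cons_ne (prev x : String) (xs : List String) (M n c3 : Int) (K : String)
    (h : ¬ x = prev) :
    rachasLoop prev (x :: xs) M n c3 K = rachasLoop x xs M 1 c3 K := by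
  simp [rachasLoop, h]

theorem rleLoop_cons_eq (actual x : String) (xs : List String) (n : Int) (h : x = actual) :
    rleLoop actual n (x :: xs) = rleLoop actual (n + 1) xs := by
  simp [rleLoop, h]

theorem rleLoop_cons_ne (actual x : String) (xs : List String) (n : Int) (h : ¬ x = actual) :
    rleLoop actual n (x :: xs) = (actual, n) :: rleLoop x 1 xs := by
  simp [rleLoop, h]

theorem rle_shape (rest : List String) : ∀ (cur : String) (n : Int),
    ∃ L rs', rleLoop cur n rest = (cur, L) :: rs' ∧ n ≤ L := by
  induction rest with
  | nil => intro cur n; exact ⟨n, [], rfl, le_refl n⟩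
  | cons x xs ih =>
    intro cur n
    by_cases h : x = cur
    · obtain ⟨L, rs', he, hL⟩ := ih cur (n + 1)
      exact ⟨L, rs', by rw [rleLoop_cons_eq _ _ _ _ h, he], by omega⟩
    · exact ⟨n, rleLoop x 1 xs, rleLoop_cons_ne _ _ _ _ h, le_refl n⟩

theorem maxSnd_head_le (p : String × Int) (t : List (String × Int)) :
    p.2 ≤ maxSnd (p :: t) := by simp [maxSnd]

theorem firstKey_head (x : String) (L : Int) (rs : List (String × Int)) :
    firstKey ((x, L) :: rs) L = x := by
  simp [firstKey, List.find?]

theorem firstKey_tail (x : String) (L m : Int) (rs : List (String × Int)) (h : ¬ L = m) :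
    firstKey ((x, L) :: rs) m = firstKey rs m := by
  simp [firstKey, h]

theorem rachasLoop_eq (rest : List String) : ∀ (cur : String) (n M c3 : Int) (K : String),
    1 ≤ n → n ≤ M →
    rachasLoop cur rest M n c3 K =
      (max M (maxSnd (rleLoop cur n rest)),
       (if M < maxSnd (rleLoop cur n rest) then firstKey (rleLoop cur n rest) (maxSnd (rleLoop cur n rest)) else K),
       c3 + cnt4 (rleLoop cur n rest) - (if 4 ≤ n then 1 else 0)) := by
  induction rest with
  | nil =>
    intro cur n M c3 K h1 h2
    show (M, K, c3) = _
    rw [show rleLoop cur n [] = [(cur, n)] from rfl]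
    have hm : maxSnd [(cur, n)] = n := by simp [maxSnd]; omega
    have hc : cnt4 [(cur, n)] = if 4 ≤ n then 1 else 0 := by
      rw [cnt4_cons]; simp [cnt4]
    rw [hm, hc, if_neg (by omega), max_eq_left h2]
    simp
  | cons x xs ih =>
    intro cur n M c3 K h1 h2
    by_cases h : x = cur
    · -- same value: run continues
      subst h
      obtain ⟨L, rs', he, hL⟩ := rle_shape xs x (n + 1)
      rw [rachasLoop_cons_eq _ _ _ _ _ _ _ rfl, rleLoop_cons_eq _ _ _ _ rfl,
          ih x (n + 1) (if M < n + 1 then n + 1 else M)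
            (if n + 1 = 4 then c3 + 1 else c3) (if M < n + 1 then x else K)
            (by omega) (by split <;> omega)]
      set S := maxSnd (rleLoop x (n + 1) xs) with hSdef
      have hLS : L ≤ S := by rw [hSdef, he]; exact maxSnd_head_le (x, L) rs'
      have hS : n + 1 ≤ S := by omega
      simp only [Prod.mk.injEq]
      refine ⟨by split <;> omega, ?_, by split <;> split <;> omega⟩
      by_cases hMn : M < n + 1
      · rw [if_pos hMn, if_pos hMn]
        by_cases hMS : n + 1 < S
        · rw [if_pos (by omega), if_pos (by omega)]
        · have hSn : S = n + 1 := by omega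
          rw [if_neg (by omega), if_pos (by omega), he,
              show L = S by omega, hSn]
          exact (firstKey_head x (n + 1) rs').symm
      · rw [if_neg hMn, if_neg hMn]
    · -- value changes: run (cur, n) is emitted, a new run starts at x with length 1
      rw [rachasLoop_cons_ne _ _ _ _ _ _ _ h, rleLoop_cons_ne _ _ _ _ h,
          ih x 1 M c3 K le_rfl (by omega)]
      set S2 := maxSnd (rleLoop x 1 xs) with hS2def
      have hmax : maxSnd ((cur, n) :: rleLoop x 1 xs) = max n S2 := by rw [hS2def]; simp [maxSnd]
      rw [hmax, cnt4_cons]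
      simp only [Prod.mk.injEq]
      refine ⟨by omega, ?_, by omega⟩
      by_cases hMS : M < S2
      · rw [if_pos hMS, if_pos (by omega), show max n S2 = S2 by omega,
            firstKey_tail _ _ _ _ (by omega)]
      · rw [if_neg hMS, if_neg (by omega)]

theorem foldl_max_eq (t : List (String × Int)) : ∀ (a : Int), 0 ≤ a →
    t.foldl (fun m p => max m p.2) a = max a (maxSnd t) := by
  induction t with
  | nil => intro a ha; simp [maxSnd]; omega
  | cons p t ih =>
    intro a ha
    simp only [List.foldl_cons, maxSnd]
    rw [ih (max a p.2) (by omega)]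
    omega

-- ===== VERDICT (by name: the statement is the Claim_ definition above) =====
theorem rachas_spec : Claim_equal_rachas := by
  unfold Claim_equal_rachas
  intro pronostico _ hpre
  unfold Spec_rachas
  match pronostico with
  | [] => exact absurd rfl hpre
  | p0 :: rest =>
    obtain ⟨L, rs', he, hL⟩ := rle_shape rest p0 1
    have hrec : rleLoop p0 0 (p0 :: rest) = rleLoop p0 1 rest :=
      rleLoop_cons_eq p0 p0 rest 0 rfl
    set S := maxSnd (rleLoop p0 1 rest) with hSdef
    have hLS : L ≤ S := by rw [hSdef, he]; exact maxSnd_head_le (p0, L) rs'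
    have hSpos : 1 ≤ S := by omega
    -- racha_max of B equals maxSnd of the runs
    have hmax : (PySem.List.max? ((rleLoop p0 1 rest).map Prod.snd) (fun y => y)).getD 0 = S := by
      rw [hSdef, he]
      simp only [List.map_cons, PySem.List.max?_id_cons, Option.getD_some, List.foldl_map]
      rw [foldl_max_eq rs' L (by omega)]
      simp [maxSnd]
    show rachas (p0 :: rest) = rachas_alt (p0 :: rest)
    unfold rachas rachas_alt
    simp only [hrec, hmax]
    rw [rachasLoop_eq rest p0 1 1 0 p0 le_rfl le_rfl, ← hSdef]
    simp only [Prod.mk.injEq]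
    refine ⟨by omega, ?_, by simp [cnt4]⟩
    by_cases h1 : 1 < S
    · rw [if_pos h1]; rfl
    · rw [if_neg h1, he, show L = S by omega, show S = 1 by omega]
      exact (firstKey_head p0 1 rs').symm
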